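-- pv_equiv track=rewrite | github.com/p0reilly/backstabbr-advisor | backstabbr_advisor/history.py | enumerate_phase_urls
-- ===== SOURCE A (Python) =====
-- _SEASONS = ["spring", "fall", "winter"]
--
-- def enumerate_phase_urls(
--     base_url: str,
--     current_season: str,
--     current_year: int,
-- ) -> list[tuple[int, str]]:
--     """
--     Return [(year, season_str), ...] from Spring 1901 up to and including the current phase.
--     season_str is one of 'spring', 'fall', 'winter'.
--     """
--     current_season_lower = current_season.lower()
--     current_idx = _SEASONS.index(current_season_lower)
--
--     phases: list[tuple[int, str]] = []
--     for year in range(1901, current_year + 1):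
--         for idx, season in enumerate(_SEASONS):
--             if year == current_year and idx > current_idx:
--                 break
--             phases.append((year, season))
--     return phases
-- ===== SOURCE B (Python) =====
-- _SEASONS = ["spring", "fall", "winter"]
--
--
-- def enumerate_phase_urls(
--     base_url: str,
--     current_season: str,
--     current_year: int,
-- ) -> list[tuple[int, str]]:
--     current_idx = _SEASONS.index(current_season.lower())
--     total = (current_year - 1901) * 3 + current_idx + 1
--     return [(1901 + i // 3, _SEASONS[i % 3]) for i in range(max(0, total))]
-- ===== Notes on version B (the rewrite author's own statement) =====
-- stated objective: simpler
-- what changed: Replaces the nested year/season loops with break by a precomputed total phase count and one linear comprehension mapping each index i to (1901 + i // 3, _SEASONS[i % 3]).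
import Mathlib
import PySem

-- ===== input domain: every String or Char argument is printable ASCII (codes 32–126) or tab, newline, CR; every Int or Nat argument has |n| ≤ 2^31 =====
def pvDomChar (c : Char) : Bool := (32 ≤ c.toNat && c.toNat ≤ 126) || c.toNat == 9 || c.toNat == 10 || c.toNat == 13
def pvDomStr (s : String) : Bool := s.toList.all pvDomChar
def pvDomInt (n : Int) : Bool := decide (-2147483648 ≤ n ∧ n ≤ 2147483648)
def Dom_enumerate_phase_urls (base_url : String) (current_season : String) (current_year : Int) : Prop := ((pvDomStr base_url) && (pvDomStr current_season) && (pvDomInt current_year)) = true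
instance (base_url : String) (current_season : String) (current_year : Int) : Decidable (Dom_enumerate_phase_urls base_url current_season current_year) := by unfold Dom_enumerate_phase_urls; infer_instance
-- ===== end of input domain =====

-- B replaces A's nested year/season loops (with break) by one linear pass over a
-- precomputed phase count using divmod index arithmetic (objective: simpler).

def pvSeasons : List String := ["spring", "fall", "winter"]

-- ===== PORT A =====
-- inner 'for idx, season in enumerate(_SEASONS)' loop with its break
def pvAInner (year current_year : Int) (current_idx : Nat) :
    List (Int × String) → List (Int × String) → List (Int × String)
  | [], phases => phases
  | (idx, season) :: rest, phases =>
    if year = current_year ∧ (current_idx : Int) < idx then phases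
    else pvAInner year current_year current_idx rest (phases ++ [(year, season)])

def enumerate_phase_urls (base_url : String) (current_season : String) (current_year : Int) : List (Int × String) :=
  let current_season_lower := PySem.Str.lower current_season
  match PySem.List.index? pvSeasons current_season_lower with
  | none => []          -- Python raises ValueError here; excluded by Pre_
  | some current_idx =>
    (PySem.List.pyRange 1901 (current_year + 1)).foldl
      (fun phases year =>
        pvAInner year current_year current_idx (PySem.List.enumerate pvSeasons) phases) []

-- ===== PORT B =====
def enumerate_phase_urls_alt (base_url : String) (current_season : String) (current_year : Int) : List (Int × String) :=
  match PySem.List.index? pvSeasons (PySem.Str.lower current_season) with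
  | none => []          -- Python raises ValueError here; excluded by Pre_
  | some current_idx =>
    let total : Int := (current_year - 1901) * 3 + current_idx + 1
    (PySem.List.pyRange 0 (max 0 total)).map
      (fun i => (1901 + PySem.Int.floordiv i 3,
                 -- _SEASONS[i % 3]: 0 ≤ i % 3 < 3 always, so plain getD is exact
                 pvSeasons.getD (PySem.Int.mod i 3).toNat ""))

-- ===== PRECONDITION & SPEC =====
-- Pre_ excludes exactly the inputs where current_season.lower() is not a season name:
-- there A (and B alike) raises ValueError from _SEASONS.index.
def Pre_enumerate_phase_urls (base_url : String) (current_season : String) (current_year : Int) : Prop :=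
  PySem.Str.lower current_season ∈ pvSeasons

instance (base_url : String) (current_season : String) (current_year : Int) : Decidable (Pre_enumerate_phase_urls base_url current_season current_year) := by unfold Pre_enumerate_phase_urls; infer_instance

def pvWitness_enumerate_phase_urls : String × String × Int := ("u", "Fall", 1903)

def Spec_enumerate_phase_urls (base_url : String) (current_season : String) (current_year : Int) (out : List (Int × String)) : Prop := out = enumerate_phase_urls_alt base_url current_season current_year
instance (base_url : String) (current_season : String) (current_year : Int) (out : List (Int × String)) : Decidable (Spec_enumerate_phase_urls base_url current_season current_year out) := by unfold Spec_enumerate_phase_urls; infer_instance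

-- ===== CLAIM (what is proved, stated in full; the proofs are below) =====
def Claim_equal_enumerate_phase_urls : Prop := ∀ (base_url : String) (current_season : String) (current_year : Int), Dom_enumerate_phase_urls base_url current_season current_year → Pre_enumerate_phase_urls base_url current_season current_year → Spec_enumerate_phase_urls base_url current_season current_year (enumerate_phase_urls base_url current_season current_year)

-- ===== LEMMAS AND PROOFS =====

-- canonical shape of the answer: n full years, then the first ci+1 seasons of year 1901+n
def pvRow (y : Int) : List (Int × String) := [(y, "spring"), (y, "fall"), (y, "winter")]

def pvFull : Nat → List (Int × String)
  | 0 => []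
  | n + 1 => pvFull n ++ pvRow (1901 + n)

lemma pvAInner_full (y cy : Int) (ci : Nat) (acc : List (Int × String)) (h : y ≠ cy) :
    pvAInner y cy ci (PySem.List.enumerate pvSeasons) acc = acc ++ pvRow y := by
  simp [PySem.List.enumerate, pvSeasons, pvAInner, pvRow, h]

lemma pvAInner_part (cy : Int) (ci : Nat) (hci : ci < 3) (acc : List (Int × String)) :
    pvAInner cy cy ci (PySem.List.enumerate pvSeasons) acc = acc ++ (pvRow cy).take (ci + 1) := by
  interval_cases ci <;> simp [PySem.List.enumerate, pvSeasons, pvAInner, pvRow]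

lemma pvFoldA_full (n : Nat) (cy : Int) (ci : Nat) (acc : List (Int × String))
    (h : (1901 : Int) + n ≤ cy) :
    (PySem.List.pyRange 1901 (1901 + (n : Int))).foldl
      (fun phases year => pvAInner year cy ci (PySem.List.enumerate pvSeasons) phases) acc
    = acc ++ pvFull n := by
  induction n generalizing acc with
  | zero => simp [PySem.List.pyRange, pvFull]
  | succ m ih =>
    have h1 : (1901 : Int) ≤ 1901 + (m : Int) := by omega
    push_cast
    rw [show (1901 : Int) + ((m : Int) + 1) = (1901 + (m : Int)) + 1 by ring,
        PySem.List.pyRange_one_succ_right h1, List.foldl_append]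
    rw [ih acc (by push_cast at h ⊢; omega)]
    simp only [List.foldl_cons, List.foldl_nil]
    rw [pvAInner_full _ _ _ _ (by push_cast at h; omega)]
    simp [pvFull]

lemma pvA_eq (n : Nat) (ci : Nat) (hci : ci < 3) :
    (PySem.List.pyRange 1901 ((1901 + (n : Int)) + 1)).foldl
      (fun phases year => pvAInner year (1901 + (n : Int)) ci (PySem.List.enumerate pvSeasons) phases) []
    = pvFull n ++ (pvRow (1901 + (n : Int))).take (ci + 1) := by
  rw [PySem.List.pyRange_one_succ_right (by omega), List.foldl_append,
      pvFoldA_full n (1901 + (n : Int)) ci [] (le_refl _)]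
  simp only [List.foldl_cons, List.foldl_nil, List.nil_append]
  rw [pvAInner_part _ _ hci]

-- B's body at a Nat index
def pvG (i : Nat) : Int × String := (1901 + ((i / 3 : Nat) : Int), pvSeasons.getD (i % 3) "")

lemma pvG_val (m r : Nat) (hr : r < 3) :
    pvG (3 * m + r) = (1901 + (m : Int), pvSeasons.getD r "") := by
  have h1 : (3 * m + r) / 3 = m := by omega
  have h2 : (3 * m + r) % 3 = r := by omega
  simp [pvG, h1, h2]

lemma pvB_eq (n : Nat) (ci : Nat) (hci : ci < 3) :
    (List.range (3 * n + ci + 1)).map pvG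
    = pvFull n ++ (pvRow (1901 + (n : Int))).take (ci + 1) := by
  induction n with
  | zero =>
    interval_cases ci <;> simp [pvG, pvFull, pvRow, pvSeasons, List.range_succ]
  | succ m ih =>
    have hsplit : 3 * (m + 1) + ci + 1 = (3 * m + ci + 1) + 3 := by omega
    have hmap : List.map pvG (List.map (fun x => 3 * m + ci + 1 + x) (List.range 3))
        = [pvG (3 * m + ci + 1 + 0), pvG (3 * m + ci + 1 + 1), pvG (3 * m + ci + 1 + 2)] := rfl
    have key : List.take (ci + 1) (pvRow (1901 + (m : Int))) ++
        [pvG (3 * m + ci + 1 + 0), pvG (3 * m + ci + 1 + 1), pvG (3 * m + ci + 1 + 2)]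
        = pvRow (1901 + (m : Int)) ++ List.take (ci + 1) (pvRow (1901 + ((m : Int) + 1))) := by
      interval_cases ci
      · rw [show 3 * m + 0 + 1 + 0 = 3 * m + 1 by omega, show 3 * m + 0 + 1 + 1 = 3 * m + 2 by omega,
            show 3 * m + 0 + 1 + 2 = 3 * (m + 1) + 0 by omega,
            pvG_val m 1 (by omega), pvG_val m 2 (by omega), pvG_val (m + 1) 0 (by omega)]
        simp [pvRow, pvSeasons]
      · rw [show 3 * m + 1 + 1 + 0 = 3 * m + 2 by omega, show 3 * m + 1 + 1 + 1 = 3 * (m + 1) + 0 by omega,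
            show 3 * m + 1 + 1 + 2 = 3 * (m + 1) + 1 by omega,
            pvG_val m 2 (by omega), pvG_val (m + 1) 0 (by omega), pvG_val (m + 1) 1 (by omega)]
        simp [pvRow, pvSeasons]
      · rw [show 3 * m + 2 + 1 + 2 = 3 * (m + 1) + 2 by omega, show 3 * m + 2 + 1 + 1 = 3 * (m + 1) + 1 by omega,
            show 3 * m + 2 + 1 + 0 = 3 * (m + 1) + 0 by omega,
            pvG_val (m + 1) 0 (by omega), pvG_val (m + 1) 1 (by omega), pvG_val (m + 1) 2 (by omega)]
        simp [pvRow, pvSeasons]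
    have hfull : pvFull (m + 1) = pvFull m ++ pvRow (1901 + (m : Int)) := rfl
    rw [hsplit, List.range_add, List.map_append, ih, hmap, hfull,
        List.append_assoc, List.append_assoc, key]
    push_cast
    ring_nf

lemma pvB_shape (ci : Nat) (hci : ci < 3) (cy : Int) (hcy : 1901 ≤ cy) :
    (PySem.List.pyRange 0 (max 0 ((cy - 1901) * 3 + ci + 1))).map
      (fun i => (1901 + PySem.Int.floordiv i 3, pvSeasons.getD (PySem.Int.mod i 3).toNat ""))
    = pvFull (cy - 1901).toNat ++ (pvRow (1901 + ((cy - 1901).toNat : Int))).take (ci + 1) := by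
  set n : Nat := (cy - 1901).toNat with hn
  have htot : max 0 ((cy - 1901) * 3 + ci + 1) = ((3 * n + ci + 1 : Nat) : Int) := by
    push_cast; omega
  rw [htot, PySem.List.pyRange_zero_natCast, List.map_map, ← pvB_eq n ci hci]
  apply List.map_congr_left
  intro i _
  simp [pvG, Function.comp]
  rw [show (((i : Int)) % 3).toNat = i % 3 by omega]

-- the three concrete index? values
lemma pvIndex_cases (s : String) (h : s ∈ pvSeasons) :
    ∃ ci : Nat, ci < 3 ∧ PySem.List.index? pvSeasons s = some ci := by
  simp [pvSeasons] at h
  rcases h with h | h | h <;> subst h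
  · exact ⟨0, by omega, by decide⟩
  · exact ⟨1, by omega, by decide⟩
  · exact ⟨2, by omega, by decide⟩

lemma pvMain (s : String) (cy : Int) (hs : s ∈ pvSeasons) :
    (match PySem.List.index? pvSeasons s with
     | none => ([] : List (Int × String))
     | some current_idx =>
       (PySem.List.pyRange 1901 (cy + 1)).foldl
         (fun phases year => pvAInner year cy current_idx (PySem.List.enumerate pvSeasons) phases) [])
    = (match PySem.List.index? pvSeasons s with
       | none => ([] : List (Int × String))
       | some current_idx =>
         (PySem.List.pyRange 0 (max 0 ((cy - 1901) * 3 + current_idx + 1))).map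
           (fun i => (1901 + PySem.Int.floordiv i 3, pvSeasons.getD (PySem.Int.mod i 3).toNat ""))) := by
  obtain ⟨ci, hci, hidx⟩ := pvIndex_cases s hs
  rw [hidx]
  dsimp only
  by_cases hcy : 1901 ≤ cy
  · have hcyn : cy = 1901 + ((cy - 1901).toNat : Int) := by omega
    rw [pvB_shape ci hci cy hcy]
    rw [show cy + 1 = (1901 + ((cy - 1901).toNat : Int)) + 1 by omega]
    have := pvA_eq (cy - 1901).toNat ci hci
    rw [← hcyn] at this ⊢
    exact this
  · -- current_year < 1901: both sides are empty
    have h1 : PySem.List.pyRange 1901 (cy + 1) = [] := by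
      simp [PySem.List.pyRange]; omega
    have h2 : max 0 ((cy - 1901) * 3 + ci + 1) = 0 := by omega
    rw [h1, h2]
    simp [PySem.List.pyRange]

-- ===== VERDICT (by name: the statement is the Claim_ definition above) =====
theorem enumerate_phase_urls_spec : Claim_equal_enumerate_phase_urls := by
  intro base_url cs cy _ hpre
  unfold Spec_enumerate_phase_urls enumerate_phase_urls enumerate_phase_urls_alt
  exact pvMain (PySem.Str.lower cs) cy hpre
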